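-- pv_equiv track=rewrite | github.com/syxadd/factormining | net/layers.py | _gen_pairs
-- ===== SOURCE A (Python) =====
-- def _gen_pairs(length, pairs=2):
--     results = []
--     # select index from 0 to length-1
--     temp_series = list(range(pairs))
--
--     def gen_series(idx_start, idx_end, pairs_start):
--         if pairs_start == pairs:
--             results.append(temp_series[:])
--             return None
--         for i in range(idx_start, idx_end):
--             temp_series[pairs_start] = i
--             gen_series(i + 1, idx_end, pairs_start + 1)
--
--     gen_series(0, length, 0)
--
--     return results
-- ===== SOURCE B (Python) =====
-- def _gen_pairs(length, pairs=2):
--     # Iterative level-by-level construction: start from the empty prefix and,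
--     # pairs times, extend every prefix by each valid next index. Lex order is
--     # preserved because prefixes are kept in lex order at every level.
--     if pairs < 0 or pairs > max(length, 0):
--         return []
--     combos = [[]]
--     for _ in range(pairs):
--         combos = [c + [j]
--                   for c in combos
--                   for j in range((c[-1] + 1) if c else 0, length)]
--     return combos
-- ===== Notes on version B (the rewrite author's own statement) =====
-- stated objective: alternative
-- what changed: Replaces the recursive backtracking over a shared mutable buffer with an iterative level-by-level build: starting from [[]], each of the 'pairs' rounds extends every prefix by all valid next indices via a comprehension, preserving lexicographic order.
import Mathlib
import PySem

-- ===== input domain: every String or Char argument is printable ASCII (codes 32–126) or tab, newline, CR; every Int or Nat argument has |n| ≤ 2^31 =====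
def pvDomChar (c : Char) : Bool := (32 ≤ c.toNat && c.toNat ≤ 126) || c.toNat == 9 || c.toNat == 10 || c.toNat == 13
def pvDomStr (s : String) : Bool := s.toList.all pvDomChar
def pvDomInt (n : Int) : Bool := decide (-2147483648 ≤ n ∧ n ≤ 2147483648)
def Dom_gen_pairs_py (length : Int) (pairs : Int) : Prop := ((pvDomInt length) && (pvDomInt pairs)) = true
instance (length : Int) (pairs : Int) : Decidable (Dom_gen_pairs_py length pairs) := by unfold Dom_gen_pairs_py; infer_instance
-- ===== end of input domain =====

-- B replaces A's recursive backtracking with an iterative level-by-level build of the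
-- same combinations in the same lexicographic order (objective: alternative).


-- ===== PORT A =====
-- A's inner 'def gen_series(idx_start, idx_end, pairs_start)' becomes genSeriesA: its
-- 'for i in range(idx_start, idx_end)' is a foldl over PySem.List.pyRange threading the
-- mutable state (temp_series, results); results.append is ++ [·].
-- The recursion depth of gen_series is pairs - pairs_start, mirrored by the structural
-- fuel argument (always equal to (pairs - pairs_start).toNat at every call; on inputs
-- Pre_ admits the fuel-0 fallback is only reached when the range is empty, where the
-- Python loop body never runs either).
-- 'temp_series[pairs_start] = i' is ported as List.set at pairs_start.toNat: exact whenever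
-- 0 ≤ pairs_start < len(temp_series), which holds on every input Pre_ admits (Python raises
-- IndexError outside; those inputs are excluded by Pre_).
def genSeriesA (pairs idx_end : Int) :
    Nat → Int → Int → List Int → List (List Int) → List Int × List (List Int)
  | 0, _, pairs_start, temp, results =>
    if pairs_start = pairs then (temp, results ++ [temp]) else (temp, results)
  | fuel + 1, idx_start, pairs_start, temp, results =>
    if pairs_start = pairs then (temp, results ++ [temp])
    else
      (PySem.List.pyRange idx_start idx_end 1).foldl
        (fun st i =>
          genSeriesA pairs idx_end fuel (i + 1) (pairs_start + 1)
            (st.1.set pairs_start.toNat i) st.2)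
        (temp, results)

def gen_pairs_py (length : Int) (pairs : Int) : List (List Int) :=
  (genSeriesA pairs length pairs.toNat 0 0 (PySem.List.pyRange 0 pairs 1) []).2

-- ===== PORT B =====
-- one round of the comprehension: [c + [j] for c in combos for j in range((c[-1] + 1) if c else 0, length)]
def genPairsStepB (length : Int) (combos : List (List Int)) : List (List Int) :=
  combos.flatMap (fun c =>
    (PySem.List.pyRange (match PySem.List.pyGet? c (-1) with | some x => x + 1 | none => 0)
        length 1).map (fun j => c ++ [j]))

def gen_pairs_py_alt (length : Int) (pairs : Int) : List (List Int) :=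
  if pairs < 0 ∨ pairs > max length 0 then []
  else (PySem.List.pyRange 0 pairs 1).foldl (fun combos _ => genPairsStepB length combos) [[]]

-- ===== PRECONDITION & SPEC =====
-- Pre_ excludes exactly the inputs on which A raises IndexError (pairs < 0 with length > 0:
-- the loop body assigns into the empty temp_series).
def Pre_gen_pairs_py (length : Int) (pairs : Int) : Prop := 0 ≤ pairs ∨ length ≤ 0
instance (length : Int) (pairs : Int) : Decidable (Pre_gen_pairs_py length pairs) := by
  unfold Pre_gen_pairs_py; infer_instance

def pvWitness_gen_pairs_py : Int × Int := (4, 2)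

def Spec_gen_pairs_py (length : Int) (pairs : Int) (out : List (List Int)) : Prop := out = gen_pairs_py_alt length pairs
instance (length : Int) (pairs : Int) (out : List (List Int)) : Decidable (Spec_gen_pairs_py length pairs out) := by unfold Spec_gen_pairs_py; infer_instance

-- ===== CLAIM (what is proved, stated in full; the proofs are below) =====
def Claim_equal_gen_pairs_py : Prop := ∀ (length : Int) (pairs : Int), Dom_gen_pairs_py length pairs → Pre_gen_pairs_py length pairs → Spec_gen_pairs_py length pairs (gen_pairs_py length pairs)


-- ===== LEMMAS AND PROOFS =====

-- reference: all strictly increasing k-element sequences over [i, L), in lexicographic order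
def pvComps (L : Int) : Nat → Int → List (List Int)
  | 0, _ => [[]]
  | k + 1, i => (PySem.List.pyRange i L 1).flatMap (fun j => (pvComps L k (j + 1)).map (fun s => j :: s))

def pvNxt (lo : Int) (c : List Int) : Int :=
  match c.getLast? with | some x => x + 1 | none => lo

lemma pvNxt_cons (lo j : Int) (c : List Int) : pvNxt lo (j :: c) = pvNxt (j + 1) c := by
  cases c with
  | nil => simp [pvNxt]
  | cons a t =>
    unfold pvNxt
    rw [List.getLast?_cons_cons]
    cases h : (a :: t).getLast? with
    | none => simp at h
    | some x => rfl

lemma pvStep_match (c : List Int) :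
    (match PySem.List.pyGet? c (-1) with | some x => x + 1 | none => (0:Int)) = pvNxt 0 c := by
  rw [PySem.List.pyGet?_neg_one]
  cases h : c.getLast? <;> simp [pvNxt, h]

lemma pvTakeSet (l : List Int) (n : Nat) (a : Int) : (l.set n a).take n = l.take n := by
  apply List.ext_getElem?
  intro m
  by_cases h : m < n
  · simp [h, List.getElem?_set_ne (by omega : n ≠ m)]
  · simp [h]

-- front/back exchange: extending every sequence at the back by one valid index
-- is the same as one more level of the front recursion
lemma pvExt (L : Int) : ∀ (k : Nat) (lo : Int),
    (pvComps L k lo).flatMap (fun c => (PySem.List.pyRange (pvNxt lo c) L 1).map (fun j => c ++ [j]))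
      = pvComps L (k + 1) lo := by
  intro k
  induction k with
  | zero =>
    intro lo
    simp only [pvComps, pvNxt, List.flatMap_cons, List.flatMap_nil, List.append_nil,
      List.getLast?_nil, List.nil_append]
    simp [List.map_eq_flatMap]
  | succ k ih =>
    intro lo
    conv_lhs => rw [pvComps]
    conv_rhs => rw [pvComps]
    rw [List.flatMap_assoc]
    refine congrArg (fun f => List.flatMap f (PySem.List.pyRange lo L 1)) (funext fun j => ?_)
    rw [← ih (j + 1), List.map_flatMap]
    rw [List.flatMap_map]
    refine List.flatMap_congr (fun c _ => ?_)
    rw [pvNxt_cons, List.map_map]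
    rfl

-- B's fold computes pvComps
lemma pvFoldB (L : Int) : ∀ (k : Nat),
    (PySem.List.pyRange 0 (k : Int) 1).foldl (fun combos _ => genPairsStepB L combos) [[]]
      = pvComps L k 0 := by
  intro k
  induction k with
  | zero => simp [PySem.List.pyRange_one_eq_nil, pvComps]
  | succ k ih =>
    have h : ((k + 1 : Nat) : Int) = (k : Int) + 1 := by push_cast; ring
    rw [h, PySem.List.pyRange_one_succ_right (by positivity), List.foldl_append, ih]
    simp only [List.foldl_cons, List.foldl_nil]
    show genPairsStepB L (pvComps L k 0) = pvComps L (k + 1) 0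
    unfold genPairsStepB
    simp only [pvStep_match]
    exact pvExt L k 0

-- no completions exist when more than L - lo positions remain
lemma pvCompsNil (L : Int) : ∀ (k : Nat) (lo : Int), L ≤ lo + k → pvComps L (k + 1) lo = [] := by
  intro k
  induction k with
  | zero =>
    intro lo h
    rw [pvComps, PySem.List.pyRange_one_eq_nil (by omega)]
    rfl
  | succ k ih =>
    intro lo h
    rw [pvComps, List.flatMap_eq_nil_iff]
    intro j hj
    rw [PySem.List.mem_pyRange_one] at hj
    rw [ih (j + 1) (by omega)]
    rfl

-- A's loop at level pairs_start, given the induction hypothesis for the next level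
lemma pvLoop (k : Nat) (pairs L : Int)
    (ih : ∀ (ps i : Int) (temp : List Int) (res : List (List Int)),
      0 ≤ ps → ps + (k : Int) = pairs → temp.length = pairs.toNat →
      (genSeriesA pairs L k i ps temp res).2
          = res ++ (pvComps L k i).map (fun s => temp.take ps.toNat ++ s)
        ∧ (genSeriesA pairs L k i ps temp res).1.length = temp.length
        ∧ (genSeriesA pairs L k i ps temp res).1.take ps.toNat = temp.take ps.toNat) :
    ∀ (n : Nat) (ps i : Int) (temp : List Int) (res : List (List Int)),
      (L - i).toNat ≤ n → 0 ≤ ps → ps + (k : Int) + 1 = pairs → temp.length = pairs.toNat →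
      ((PySem.List.pyRange i L 1).foldl
          (fun st j =>
            genSeriesA pairs L k (j + 1) (ps + 1) (st.1.set ps.toNat j) st.2)
          (temp, res)).2
          = res ++ (PySem.List.pyRange i L 1).flatMap
              (fun j => (pvComps L k (j + 1)).map (fun s => temp.take ps.toNat ++ j :: s))
        ∧ ((PySem.List.pyRange i L 1).foldl
            (fun st j =>
              genSeriesA pairs L k (j + 1) (ps + 1) (st.1.set ps.toNat j) st.2)
            (temp, res)).1.length = temp.length
        ∧ ((PySem.List.pyRange i L 1).foldl
            (fun st j =>
              genSeriesA pairs L k (j + 1) (ps + 1) (st.1.set ps.toNat j) st.2)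
            (temp, res)).1.take ps.toNat = temp.take ps.toNat := by
  intro n
  induction n with
  | zero =>
    intro ps i temp res hn hps hsum hlen
    have hLe : L ≤ i := by omega
    simp [PySem.List.pyRange_one_eq_nil hLe]
  | succ n ihn =>
    intro ps i temp res hn hps hsum hlen
    by_cases h : i < L
    · have hlt : ps.toNat < temp.length := by omega
      have hcast : (ps + 1).toNat = ps.toNat + 1 := by omega
      obtain ⟨hs2, hs1len, hs1take⟩ :=
        ih (ps + 1) (i + 1) (temp.set ps.toNat i) res (by omega) (by omega)
          (by rw [List.length_set]; exact hlen)
      have htake1 : (temp.set ps.toNat i).take (ps + 1).toNat = temp.take ps.toNat ++ [i] := by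
        rw [hcast, List.take_add_one, pvTakeSet,
          List.getElem?_set_self (by omega : ps.toNat < temp.length)]
        rfl
      set r := genSeriesA pairs L k (i + 1) (ps + 1) (temp.set ps.toNat i) res with hr
      have hr1take : r.1.take ps.toNat = temp.take ps.toNat := by
        have h1 : r.1.take (ps.toNat + 1) = (temp.set ps.toNat i).take (ps.toNat + 1) := by
          rw [← hcast, hs1take, hcast]
        calc r.1.take ps.toNat = (r.1.take (ps.toNat + 1)).take ps.toNat := by
              rw [List.take_take]; congr 1; omega
          _ = ((temp.set ps.toNat i).take (ps.toNat + 1)).take ps.toNat := by rw [h1]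
          _ = (temp.set ps.toNat i).take ps.toNat := by rw [List.take_take]; congr 1; omega
          _ = temp.take ps.toNat := pvTakeSet _ _ _
      have hr1len : r.1.length = temp.length := by
        rw [hs1len, List.length_set]
      obtain ⟨hl2, hl1len, hl1take⟩ :=
        ihn ps (i + 1) r.1 r.2 (by omega) hps hsum (by rw [hr1len]; exact hlen)
      have hstep : ∀ z : List Int × List (List Int),
          (PySem.List.pyRange i L 1).foldl
            (fun st j =>
              genSeriesA pairs L k (j + 1) (ps + 1) (st.1.set ps.toNat j) st.2) z
          = (PySem.List.pyRange (i + 1) L 1).foldl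
            (fun st j =>
              genSeriesA pairs L k (j + 1) (ps + 1) (st.1.set ps.toNat j) st.2)
            (genSeriesA pairs L k (i + 1) (ps + 1) (z.1.set ps.toNat i) z.2) := by
        intro z
        rw [PySem.List.pyRange_one_cons h, List.foldl_cons]
      rw [hstep (temp, res)]
      refine ⟨?_, ?_, ?_⟩
      · rw [show ((temp, res) : List Int × List (List Int)).1 = temp from rfl,
          show ((temp, res) : List Int × List (List Int)).2 = res from rfl, ← hr, hl2,
          hr1take, hs2, htake1, PySem.List.pyRange_one_cons h, List.flatMap_cons,
          List.append_assoc]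
        congr 2
        apply List.map_congr_left
        intro s _
        simp
      · rw [show ((temp, res) : List Int × List (List Int)).1 = temp from rfl,
          show ((temp, res) : List Int × List (List Int)).2 = res from rfl, ← hr, hl1len, hr1len]
      · rw [show ((temp, res) : List Int × List (List Int)).1 = temp from rfl,
          show ((temp, res) : List Int × List (List Int)).2 = res from rfl, ← hr, hl1take, hr1take]
    · have hLe : L ≤ i := by omega
      simp [PySem.List.pyRange_one_eq_nil hLe]

-- characterisation of A's recursion: at level ps with k positions left to fill,
-- it appends all completions and only touches temp beyond position ps
lemma pvSer : ∀ (k : Nat) (pairs L ps i : Int) (temp : List Int) (res : List (List Int)),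
    0 ≤ ps → ps + (k : Int) = pairs → temp.length = pairs.toNat →
    (genSeriesA pairs L k i ps temp res).2
        = res ++ (pvComps L k i).map (fun s => temp.take ps.toNat ++ s)
      ∧ (genSeriesA pairs L k i ps temp res).1.length = temp.length
      ∧ (genSeriesA pairs L k i ps temp res).1.take ps.toNat = temp.take ps.toNat := by
  intro k
  induction k with
  | zero =>
    intro pairs L ps i temp res hps hsum hlen
    have hpe : ps = pairs := by omega
    have htn : ps.toNat = temp.length := by omega
    simp [genSeriesA, if_pos hpe, pvComps, htn]
  | succ k ih =>
    intro pairs L ps i temp res hps hsum hlen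
    have hne : ¬ ps = pairs := by omega
    have hser : genSeriesA pairs L (k + 1) i ps temp res
        = (PySem.List.pyRange i L 1).foldl
            (fun st j =>
              genSeriesA pairs L k (j + 1) (ps + 1) (st.1.set ps.toNat j) st.2)
            (temp, res) := by
      rw [genSeriesA]; simp only [if_neg hne]
    obtain ⟨h2, h1len, h1take⟩ :=
      pvLoop k pairs L (fun ps i temp res h1 h2 h3 => ih pairs L ps i temp res h1 h2 h3)
        (L - i).toNat ps i temp res (le_refl _) hps (by push_cast at hsum ⊢; omega) hlen
    refine ⟨?_, ?_, ?_⟩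
    · rw [hser, h2]
      congr 1
      rw [pvComps]
      rw [List.map_flatMap]
      refine List.flatMap_congr (fun j _ => ?_)
      rw [List.map_map]
      rfl
    · rw [hser, h1len]
    · rw [hser, h1take]

-- ===== VERDICT (by name: the statement is the Claim_ definition above) =====
theorem gen_pairs_py_spec : Claim_equal_gen_pairs_py := by
  intro L pairs _ hpre
  unfold Spec_gen_pairs_py gen_pairs_py gen_pairs_py_alt
  by_cases hneg : pairs < 0
  · have hL : L ≤ 0 := by
      rcases hpre with h | h
      · omega
      · exact h
    have hfz : pairs.toNat = 0 := by omega
    rw [if_pos (Or.inl hneg), hfz, genSeriesA]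
    simp [if_neg (by omega : ¬ (0:Int) = pairs)]
  · obtain ⟨h2, -, -⟩ :=
      pvSer pairs.toNat pairs L 0 0 (PySem.List.pyRange 0 pairs 1) [] (le_refl 0)
        (by omega) (by rw [PySem.List.length_pyRange_one]; omega)
    rw [h2]
    by_cases hbig : pairs > max L 0
    · have hgtL : L < pairs := lt_of_le_of_lt (le_max_left L 0) hbig
      have hgt0 : 0 < pairs := lt_of_le_of_lt (le_max_right L 0) hbig
      rw [if_pos (Or.inr hbig)]
      have hk : pairs.toNat = (pairs.toNat - 1) + 1 := by omega
      rw [hk, pvCompsNil L (pairs.toNat - 1) 0 (by omega)]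
      simp
    · rw [if_neg (not_or.mpr ⟨hneg, hbig⟩)]
      have hcast : ((pairs.toNat : Nat) : Int) = pairs := by omega
      conv_rhs => rw [← hcast]
      rw [pvFoldB L pairs.toNat]
      simp
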